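-- pv_equiv track=rewrite | github.com/Seljelid/aoc2020 | src/20201212.py | _rotate_waypoint
-- ===== SOURCE A (Python) =====
-- def _rotate_waypoint(waypoint, turn, deg):
--     quadrant = deg // 90
--     quadrant %= 4
--     if turn == "L":
--         quadrant = 4 - quadrant
--     for _ in range(quadrant):
--         waypoint = {"x": waypoint["y"], "y": -waypoint["x"]}
--     return waypoint
-- ===== SOURCE B (Python) =====
-- def _rotate_waypoint(waypoint, turn, deg):
--     q = (deg // 90) % 4
--     if turn == "L":
--         q = 4 - q
--     if q == 0:
--         return waypoint
--     x, y = waypoint["x"], waypoint["y"]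
--     return [{"x": x, "y": y},
--             {"x": y, "y": -x},
--             {"x": -x, "y": -y},
--             {"x": -y, "y": x}][q % 4]
-- ===== Notes on version B (the rewrite author's own statement) =====
-- stated objective: simpler
-- what changed: B replaces A's repeated-90-degree-rotation loop (up to 4 iterations rebuilding the dict each time) with a closed-form selection: compute the quarter-turn count once and return the rotated pair directly from a 4-entry table.
import Mathlib
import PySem

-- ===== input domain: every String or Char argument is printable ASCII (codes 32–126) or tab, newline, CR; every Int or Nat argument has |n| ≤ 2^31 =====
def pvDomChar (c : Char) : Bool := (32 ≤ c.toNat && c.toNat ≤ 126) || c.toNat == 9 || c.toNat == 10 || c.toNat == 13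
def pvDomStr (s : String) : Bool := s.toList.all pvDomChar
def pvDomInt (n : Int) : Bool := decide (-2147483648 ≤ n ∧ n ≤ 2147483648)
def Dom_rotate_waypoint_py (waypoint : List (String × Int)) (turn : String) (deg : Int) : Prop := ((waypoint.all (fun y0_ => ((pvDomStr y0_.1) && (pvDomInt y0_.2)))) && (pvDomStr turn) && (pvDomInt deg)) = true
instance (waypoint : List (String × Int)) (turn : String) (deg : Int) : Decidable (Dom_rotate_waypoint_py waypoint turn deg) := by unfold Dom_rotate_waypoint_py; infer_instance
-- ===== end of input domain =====

-- B replaces A's up-to-4-step rotation loop by a closed-form selection of the rotated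
-- pair from the quarter-turn count (objective: simpler).

-- ===== PORT A =====
-- one loop body: waypoint = {"x": waypoint["y"], "y": -waypoint["x"]}; none = KeyError
def pvRotStep (d : List (String × Int)) : Option (List (String × Int)) :=
  match d.lookup "y", d.lookup "x" with
  | some y, some x => some [("x", y), ("y", -x)]
  | _, _ => none

-- for _ in range(quadrant): …
def pvRotLoop : Nat → List (String × Int) → Option (List (String × Int))
  | 0, d => some d
  | n + 1, d =>
    match pvRotStep d with
    | some d' => pvRotLoop n d'
    | none => none

def rotate_waypoint_py (waypoint : List (String × Int)) (turn : String) (deg : Int) : List (String × Int) :=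
  let quadrant := PySem.Int.mod (PySem.Int.floordiv deg 90) 4
  let quadrant := if turn == "L" then 4 - quadrant else quadrant
  ((pvRotLoop quadrant.toNat waypoint).getD waypoint)  -- getD unreachable: Pre_ guarantees the loop never hits a KeyError

-- ===== PORT B =====
def rotate_waypoint_py_alt (waypoint : List (String × Int)) (turn : String) (deg : Int) : List (String × Int) :=
  let q0 := PySem.Int.mod (PySem.Int.floordiv deg 90) 4
  let q := if turn == "L" then 4 - q0 else q0
  if q = 0 then waypoint
  else
    match waypoint.lookup "x", waypoint.lookup "y" with
    | some x, some y =>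
      ((PySem.List.pyGet?
          [[("x", x), ("y", y)], [("x", y), ("y", -x)],
           [("x", -x), ("y", -y)], [("x", -y), ("y", x)]]
          (PySem.Int.mod q 4)).getD waypoint)  -- getD unreachable: q % 4 ∈ [0,4)
    | _, _ => waypoint  -- unreachable under Pre_: KeyError in Python

-- ===== PRECONDITION & SPEC =====
-- Pre_ excludes exactly the KeyError inputs: whenever the turn count is nonzero
-- (i.e. unless turn ≠ "L" and (deg//90) % 4 = 0), keys "x" and "y" must be present.
def Pre_rotate_waypoint_py (waypoint : List (String × Int)) (turn : String) (deg : Int) : Prop :=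
  (¬ turn = "L" ∧ PySem.Int.mod (PySem.Int.floordiv deg 90) 4 = 0) ∨
  ((waypoint.lookup "x").isSome ∧ (waypoint.lookup "y").isSome)
instance (waypoint : List (String × Int)) (turn : String) (deg : Int) : Decidable (Pre_rotate_waypoint_py waypoint turn deg) := by unfold Pre_rotate_waypoint_py; infer_instance

def pvWitness_rotate_waypoint_py : (List (String × Int)) × String × Int := ([("x", 10), ("y", -4)], "L", 180)

def Spec_rotate_waypoint_py (waypoint : List (String × Int)) (turn : String) (deg : Int) (out : List (String × Int)) : Prop := out = rotate_waypoint_py_alt waypoint turn deg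
instance (waypoint : List (String × Int)) (turn : String) (deg : Int) (out : List (String × Int)) : Decidable (Spec_rotate_waypoint_py waypoint turn deg out) := by unfold Spec_rotate_waypoint_py; infer_instance

-- ===== CLAIM (what is proved, stated in full; the proofs are below) =====
def Claim_equal_rotate_waypoint_py : Prop := ∀ (waypoint : List (String × Int)) (turn : String) (deg : Int), Dom_rotate_waypoint_py waypoint turn deg → Pre_rotate_waypoint_py waypoint turn deg → Spec_rotate_waypoint_py waypoint turn deg (rotate_waypoint_py waypoint turn deg)

-- ===== LEMMAS AND PROOFS =====

theorem rotate_eq_aux (waypoint : List (String × Int)) (turn : String) (deg : Int)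
    (hpre : Pre_rotate_waypoint_py waypoint turn deg) :
    rotate_waypoint_py waypoint turn deg = rotate_waypoint_py_alt waypoint turn deg := by
  have h0 : 0 ≤ PySem.Int.mod (PySem.Int.floordiv deg 90) 4 := PySem.Int.mod_nonneg _ (by omega)
  have h4 : PySem.Int.mod (PySem.Int.floordiv deg 90) 4 < 4 := PySem.Int.mod_lt _ (by omega)
  have hq : PySem.Int.mod (PySem.Int.floordiv deg 90) 4 = 0 ∨
      PySem.Int.mod (PySem.Int.floordiv deg 90) 4 = 1 ∨
      PySem.Int.mod (PySem.Int.floordiv deg 90) 4 = 2 ∨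
      PySem.Int.mod (PySem.Int.floordiv deg 90) 4 = 3 := by omega
  by_cases hL : turn = "L"
  · -- q = 4 - q0 ∈ [1,4] : Pre_ gives both keys
    rcases hpre with ⟨hne, _⟩ | ⟨hx, hy⟩
    · exact absurd hL hne
    obtain ⟨x, hx⟩ := Option.isSome_iff_exists.mp hx
    obtain ⟨y, hy⟩ := Option.isSome_iff_exists.mp hy
    rcases hq with h | h | h | h <;>
    · simp only [rotate_waypoint_py, rotate_waypoint_py_alt, h, hL]
      simp [pvRotLoop, pvRotStep, List.lookup, hx, hy, PySem.Int.mod, PySem.List.pyGet?, PySem.List.pyIdx?]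
  · have hBL : (turn == "L") = false := by simp [hL]
    rcases hq with h | h | h | h
    · -- zero iterations: both return waypoint unchanged
      simp only [rotate_waypoint_py, rotate_waypoint_py_alt, h, hBL]
      simp [pvRotLoop]
    all_goals {
      rcases hpre with ⟨_, hz⟩ | ⟨hx, hy⟩
      · omega
      obtain ⟨x, hx⟩ := Option.isSome_iff_exists.mp hx
      obtain ⟨y, hy⟩ := Option.isSome_iff_exists.mp hy
      simp only [rotate_waypoint_py, rotate_waypoint_py_alt, h, hBL]
      simp [pvRotLoop, pvRotStep, List.lookup, hx, hy, PySem.Int.mod, PySem.List.pyGet?, PySem.List.pyIdx?] }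

-- ===== VERDICT (by name: the statement is the Claim_ definition above) =====
theorem rotate_waypoint_py_spec : Claim_equal_rotate_waypoint_py := by
  intro waypoint turn deg _ hpre
  exact rotate_eq_aux waypoint turn deg hpre
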